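-- pv_equiv track=rewrite | github.com/MOHAMMAD-KIMIA/Compiler | Compiler 1st phase (Lexical Analysis)/COM.py | dfaRightBrace
-- ===== SOURCE A (Python) =====
-- def dfaRightBrace(input_text):
--     state = 'X'
--     right_brace_tokens = []
--     right_brace_errors = []
--     position = 0
--
--     for ch in input_text:
--         position += 1
--         if ch == '}':
--             right_brace_tokens.append("<}>")
--         else:
--             right_brace_errors.append(position)
--             break
--
--     return right_brace_tokens, right_brace_errors
-- ===== SOURCE B (Python) =====
-- def dfaRightBrace(input_text):
--     stripped = input_text.lstrip('}')
--     count = len(input_text) - len(stripped)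
--     tokens = ["<}>"] * count
--     errors = [count + 1] if stripped else []
--     return tokens, errors
-- ===== Notes on version B (the rewrite author's own statement) =====
-- stated objective: simpler
-- what changed: Replaces the stateful per-character loop-with-break by computing the leading right-brace prefix length with lstrip and building both result lists directly from that count.
import Mathlib
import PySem

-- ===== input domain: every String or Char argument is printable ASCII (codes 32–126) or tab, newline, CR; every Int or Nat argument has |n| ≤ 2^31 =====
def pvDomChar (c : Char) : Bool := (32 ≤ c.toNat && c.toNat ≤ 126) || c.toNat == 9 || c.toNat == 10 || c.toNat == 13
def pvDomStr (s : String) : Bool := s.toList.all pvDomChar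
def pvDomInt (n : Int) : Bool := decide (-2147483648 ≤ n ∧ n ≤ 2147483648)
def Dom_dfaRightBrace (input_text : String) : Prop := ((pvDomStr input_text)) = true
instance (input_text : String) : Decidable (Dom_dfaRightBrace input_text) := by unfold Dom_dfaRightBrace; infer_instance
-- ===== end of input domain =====

-- B computes the leading right-brace prefix length (dropWhile) and builds both lists from that count,
-- instead of A's stateful per-character loop with break; objective: simpler.


-- ===== PORT A =====
-- the for-loop with break: position is incremented first, then the char is tested
def dfaRightBraceLoop : List Char → Int → List String × List Int
  | [], _ => ([], [])
  | c :: rest, position =>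
    if c = '}' then
      let r := dfaRightBraceLoop rest (position + 1)
      ("<}>" :: r.1, r.2)
    else
      ([], [position + 1])

def dfaRightBrace (input_text : String) : List String × List Int :=
  dfaRightBraceLoop input_text.toList 0

-- ===== PORT B =====
def dfaRightBrace_alt (input_text : String) : List String × List Int :=
  let stripped := input_text.toList.dropWhile (· == '}')   -- lstrip('}')
  let count := input_text.toList.length - stripped.length
  (List.replicate count "<}>", if stripped = [] then [] else [(count : Int) + 1])

-- ===== PRECONDITION & SPEC =====
def Spec_dfaRightBrace (input_text : String) (out : List String × List Int) : Prop := out = dfaRightBrace_alt input_text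
instance (input_text : String) (out : List String × List Int) : Decidable (Spec_dfaRightBrace input_text out) := by unfold Spec_dfaRightBrace; infer_instance

-- ===== CLAIM (what is proved, stated in full; the proofs are below) =====
def Claim_equal_dfaRightBrace : Prop := ∀ (input_text : String), Dom_dfaRightBrace input_text → Spec_dfaRightBrace input_text (dfaRightBrace input_text)

-- ===== LEMMAS AND PROOFS =====
-- number of leading '}' characters (proof-side helper)
def pvLeadCount : List Char → Nat
  | [] => 0
  | c :: rest => if c = '}' then pvLeadCount rest + 1 else 0

theorem pvLeadCount_eq (l : List Char) :
    pvLeadCount l = l.length - (l.dropWhile (· == '}')).length := by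
  induction l with
  | nil => rfl
  | cons c rest ih =>
    have hle := List.length_dropWhile_le (p := (· == '}')) (l := rest)
    by_cases hc : c = '}'
    · simp [pvLeadCount, hc, ih]
      omega
    · have hb : (c == '}') = false := by simp [hc]
      simp [pvLeadCount, hc, hb]

theorem pvDropWhile_cons_brace (rest : List Char) :
    (('}' :: rest).dropWhile (· == '}')) = rest.dropWhile (· == '}') := by
  simp [List.dropWhile]

theorem dfaRightBraceLoop_eq (l : List Char) (position : Int) :
    dfaRightBraceLoop l position =
      (List.replicate (pvLeadCount l) "<}>",
       if l.dropWhile (· == '}') = [] then []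
       else [position + (pvLeadCount l : Int) + 1]) := by
  induction l generalizing position with
  | nil => simp [dfaRightBraceLoop, pvLeadCount]
  | cons c rest ih =>
    by_cases hc : c = '}'
    · subst hc
      rw [pvDropWhile_cons_brace]
      simp only [dfaRightBraceLoop, ih, pvLeadCount, if_true]
      by_cases hnil : rest.dropWhile (· == '}') = []
      · simp [hnil, List.replicate_succ]
      · rw [if_neg hnil, List.replicate_succ]
        refine Prod.ext rfl ?_
        rw [if_neg hnil]
        simp only [List.cons.injEq, and_true]
        push_cast
        ring
    · have hb : (c == '}') = false := by simp [hc]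
      have hdw : ((c :: rest).dropWhile (· == '}')) = c :: rest := by
        simp [hb]
      simp [dfaRightBraceLoop, hc, hdw, pvLeadCount]

-- ===== VERDICT (by name: the statement is the Claim_ definition above) =====
theorem dfaRightBrace_spec : Claim_equal_dfaRightBrace := by
  intro s _
  unfold Spec_dfaRightBrace dfaRightBrace dfaRightBrace_alt
  simp [dfaRightBraceLoop_eq, pvLeadCount_eq]
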